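-- pv_equiv track=rewrite | github.com/mireiahernandez/aligning-books-movies | graphs/book_graph/parse_book.py | split_into_chaps
-- ===== SOURCE A (Python) =====
-- def split_into_chaps(pars):
--     chaps, i = [], 0
--     while i < len(pars):
--         chap = []
--         par = pars[i]
--         while par[:7] != 'CHAPTER' and i < len(pars):
--             chap.append(par)
--             i += 1
--             if i < len(pars): par = pars[i]
--         chaps.append(chap)
--         i += 2
--     return chaps[1:]
-- ===== SOURCE B (Python) =====
-- def split_into_chaps(pars):
--     # Two-pass: first collect chapter-marker indices (skipping the title line
--     # after each marker), then build each chapter as one slice of pars.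
--     n = len(pars)
--     markers = []
--     i = 0
--     while i < n:
--         if pars[i][:7] == 'CHAPTER':
--             markers.append(i)
--             i += 2
--         else:
--             i += 1
--     chaps = []
--     prev = 0
--     for m in markers:
--         chaps.append(pars[prev:m])
--         prev = m + 2
--     if prev < n:
--         chaps.append(pars[prev:])
--     return chaps[1:]
-- ===== Notes on version B (the rewrite author's own statement) =====
-- stated objective: simpler
-- what changed: A's nested while-loops that grow each chapter string-by-string are replaced by a two-pass shape: one scan collects the chapter-marker indices (skipping the title line after each marker), then each chapter is cut out of pars as a single slice between consecutive boundaries.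
import Mathlib
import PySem

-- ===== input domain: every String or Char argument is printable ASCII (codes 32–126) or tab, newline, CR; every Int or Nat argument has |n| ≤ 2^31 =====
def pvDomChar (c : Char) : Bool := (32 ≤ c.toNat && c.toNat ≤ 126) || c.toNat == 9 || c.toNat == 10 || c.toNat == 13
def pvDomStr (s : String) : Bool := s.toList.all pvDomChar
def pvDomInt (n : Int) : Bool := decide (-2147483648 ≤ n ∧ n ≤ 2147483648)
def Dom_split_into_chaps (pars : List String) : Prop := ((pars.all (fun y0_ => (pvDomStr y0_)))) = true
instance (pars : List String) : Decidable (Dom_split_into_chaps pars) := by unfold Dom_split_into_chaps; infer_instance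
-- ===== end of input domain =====

-- B replaces A's nested incremental while-loops by a two-pass shape (collect marker
-- indices, then slice each chapter out of pars); objective: simpler decomposition.
-- Loops are ported with a fuel argument that only makes the same computation total.

-- ===== PORT A =====
-- inner 'while par[:7] != 'CHAPTER' and i < len(pars)' loop; state (i, par, chap);
-- fuel ≥ pars.length - i always suffices (the loop advances i by 1 each step)
def splitInnerA (pars : List String) (fuel i : Nat) (par : String)
    (chap : List String) : List String × Nat :=
  match fuel with
  | 0 => (chap, i)
  | fuel + 1 =>
    if PySem.Str.slice par none (some 7) ≠ "CHAPTER" ∧ i < pars.length then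
      splitInnerA pars fuel (i + 1) (if i + 1 < pars.length then pars[i + 1]! else par)
        (chap ++ [par])
    else (chap, i)

-- outer 'while i < len(pars)' loop; state (i, chaps)
def splitOuterA (pars : List String) (fuel i : Nat) (chaps : List (List String)) :
    List (List String) :=
  match fuel with
  | 0 => chaps
  | fuel + 1 =>
    if i < pars.length then
      let r := splitInnerA pars pars.length i (pars[i]!) []
      splitOuterA pars fuel (r.2 + 2) (chaps ++ [r.1])
    else chaps

def split_into_chaps (pars : List String) : List (List String) :=
  PySem.List.slice (splitOuterA pars (pars.length + 1) 0 []) (some 1) none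

-- ===== PORT B =====
-- first pass: indices i with pars[i][:7] == 'CHAPTER', skipping the title after each;
-- fuel ≥ pars.length - i suffices (i advances by at least 1 each step)
def markersB (pars : List String) (fuel i : Nat) : List Nat :=
  match fuel with
  | 0 => []
  | fuel + 1 =>
    if _h : i < pars.length then
      if PySem.Str.slice (pars[i]!) none (some 7) = "CHAPTER" then
        i :: markersB pars fuel (i + 2)
      else
        markersB pars fuel (i + 1)
    else []

def split_into_chaps_alt (pars : List String) : List (List String) :=
  let n := pars.length
  let cp := (markersB pars n 0).foldl
    (fun (acc : List (List String) × Nat) (m : Nat) =>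
      (acc.1 ++ [PySem.List.slice pars (some (acc.2 : Int)) (some ((m : Int)))], m + 2))
    ([], 0)
  let chaps := if cp.2 < n then cp.1 ++ [PySem.List.slice pars (some (cp.2 : Int)) none]
    else cp.1
  PySem.List.slice chaps (some 1) none

-- ===== PRECONDITION & SPEC =====
def Spec_split_into_chaps (pars : List String) (out : List (List String)) : Prop := out = split_into_chaps_alt pars
instance (pars : List String) (out : List (List String)) : Decidable (Spec_split_into_chaps pars out) := by unfold Spec_split_into_chaps; infer_instance

-- ===== CLAIM (what is proved, stated in full; the proofs are below) =====
def Claim_equal_split_into_chaps : Prop := ∀ (pars : List String), Dom_split_into_chaps pars → Spec_split_into_chaps pars (split_into_chaps pars)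

-- ===== LEMMAS AND PROOFS =====

-- markersB is fuel-insensitive once the fuel covers the remaining indices
theorem markersB_nil (pars : List String) (fuel i : Nat) (hi : ¬ i < pars.length) :
    markersB pars fuel i = [] := by
  cases fuel with
  | zero => rfl
  | succ fuel => rw [markersB, dif_neg hi]

theorem markersB_fuel (pars : List String) :
    ∀ (f1 f2 i : Nat), pars.length - i ≤ f1 → pars.length - i ≤ f2 →
    markersB pars f1 i = markersB pars f2 i := by
  intro f1
  induction f1 with
  | zero =>
    intro f2 i h1 _
    rw [markersB_nil pars 0 i (by omega), markersB_nil pars f2 i (by omega)]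
  | succ f1 ih =>
    intro f2 i h1 h2
    by_cases hi : i < pars.length
    · cases f2 with
      | zero => omega
      | succ f2 =>
        rw [markersB, markersB, dif_pos hi, dif_pos hi]
        by_cases hc : PySem.Str.slice (pars[i]!) none (some 7) = "CHAPTER"
        · rw [if_pos hc, if_pos hc, ih f2 (i + 2) (by omega) (by omega)]
        · rw [if_neg hc, if_neg hc, ih f2 (i + 1) (by omega) (by omega)]
    · rw [markersB_nil pars _ i hi, markersB_nil pars f2 i hi]

-- one unfolding step of markersB, keeping the SAME fuel
theorem markersB_step (pars : List String) (fuel i : Nat)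
    (hf : pars.length - i ≤ fuel) (hi : i < pars.length) :
    markersB pars fuel i =
      if PySem.Str.slice (pars[i]!) none (some 7) = "CHAPTER" then
        i :: markersB pars fuel (i + 2)
      else markersB pars fuel (i + 1) := by
  cases fuel with
  | zero => omega
  | succ fuel =>
    rw [markersB, dif_pos hi]
    by_cases hc : PySem.Str.slice (pars[i]!) none (some 7) = "CHAPTER"
    · rw [if_pos hc, if_pos hc,
        markersB_fuel pars fuel (fuel + 1) (i + 2) (by omega) (by omega)]
    · rw [if_neg hc, if_neg hc,
        markersB_fuel pars fuel (fuel + 1) (i + 1) (by omega) (by omega)]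

-- common reference shape: chapters cut out of pars at the marker positions M,
-- current segment starting at prev
def segsRef (pars : List String) (M : List Nat) (prev : Nat) : List (List String) :=
  match M with
  | [] => if prev < pars.length then [pars.drop prev] else []
  | m :: ms => ((pars.drop prev).take (m - prev)) :: segsRef pars ms (m + 2)

-- B's foldl-and-final-if equals segsRef
theorem foldB_eq_segsRef (pars : List String) :
    ∀ (M : List Nat) (acc : List (List String)) (prev : Nat),
    (if (M.foldl
        (fun (acc : List (List String) × Nat) (m : Nat) =>
          (acc.1 ++ [PySem.List.slice pars (some (acc.2 : Int)) (some ((m : Int)))], m + 2))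
        (acc, prev)).2 < pars.length then
      (M.foldl
        (fun (acc : List (List String) × Nat) (m : Nat) =>
          (acc.1 ++ [PySem.List.slice pars (some (acc.2 : Int)) (some ((m : Int)))], m + 2))
        (acc, prev)).1 ++
        [PySem.List.slice pars
          (some (((M.foldl
            (fun (acc : List (List String) × Nat) (m : Nat) =>
              (acc.1 ++ [PySem.List.slice pars (some (acc.2 : Int)) (some ((m : Int)))], m + 2))
            (acc, prev)).2 : Nat) : Int)) none]
    else
      (M.foldl
        (fun (acc : List (List String) × Nat) (m : Nat) =>
          (acc.1 ++ [PySem.List.slice pars (some (acc.2 : Int)) (some ((m : Int)))], m + 2))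
        (acc, prev)).1) = acc ++ segsRef pars M prev := by
  intro M
  induction M with
  | nil =>
    intro acc prev
    simp only [List.foldl_nil, segsRef]
    split
    · rw [PySem.List.slice_from_natCast]
    · simp
  | cons m ms ih =>
    intro acc prev
    simp only [List.foldl_cons, segsRef]
    rw [ih (acc ++ [PySem.List.slice pars (some (prev : Int)) (some ((m : Int)))]) (m + 2)]
    rw [PySem.List.slice_natCast]
    simp

-- inner-loop characterisation: from i < n with par = pars[i]!, the inner loop stops at
-- e = the first index ≥ i whose paragraph starts with CHAPTER (or at n), having
-- collected pars[i:e]; and markersB from i is e followed by markersB from e+2 (if e < n)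
theorem innerA_char (pars : List String) :
    ∀ (fuel i : Nat) (chap : List String) (mf : Nat),
    pars.length - i ≤ fuel → i < pars.length → pars.length - i ≤ mf →
    ∃ e, i ≤ e ∧ e ≤ pars.length ∧
      splitInnerA pars fuel i (pars[i]!) chap = (chap ++ (pars.drop i).take (e - i), e) ∧
      markersB pars mf i =
        (if e < pars.length then e :: markersB pars mf (e + 2) else []) := by
  intro fuel
  induction fuel with
  | zero => intro i chap mf hk hi _; omega
  | succ fuel ih =>
    intro i chap mf hk hi hmf
    have hbang : pars[i]! = pars[i] := getElem!_pos pars i hi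
    by_cases hc : PySem.Str.slice (pars[i]!) none (some 7) = "CHAPTER"
    · -- marker at i: inner stops at once
      refine ⟨i, le_refl _, le_of_lt hi, ?_, ?_⟩
      · rw [splitInnerA, if_neg (fun h => h.1 hc)]
        simp
      · rw [markersB_step pars mf i hmf hi, if_pos hc, if_pos hi]
    · have hdrop : pars.drop i = pars[i]! :: pars.drop (i + 1) := by
        rw [hbang]; exact List.drop_eq_getElem_cons hi
      by_cases h1 : i + 1 < pars.length
      · obtain ⟨e, he1, he2, he3, he4⟩ :=
          ih (i + 1) (chap ++ [pars[i]!]) mf (by omega) h1 (by omega)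
        refine ⟨e, by omega, he2, ?_, ?_⟩
        · rw [splitInnerA, if_pos ⟨hc, hi⟩, if_pos h1, he3]
          have ht : (pars.drop i).take (e - i) =
              pars[i]! :: (pars.drop (i + 1)).take (e - (i + 1)) := by
            rw [hdrop, show e - i = (e - (i + 1)) + 1 by omega, List.take_succ_cons]
          rw [ht]
          simp
        · rw [markersB_step pars mf i hmf hi, if_neg hc]
          exact he4
      · -- i is the last index and its paragraph is not a marker
        refine ⟨pars.length, by omega, le_refl _, ?_, ?_⟩
        · rw [splitInnerA, if_pos ⟨hc, hi⟩, if_neg h1]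
          have hstop : splitInnerA pars fuel (i + 1) (pars[i]!)
              (chap ++ [pars[i]!]) = (chap ++ [pars[i]!], i + 1) := by
            cases fuel with
            | zero => rfl
            | succ fuel => rw [splitInnerA, if_neg (fun h => h1 h.2)]
          rw [hstop]
          have hnil : pars.drop (i + 1) = [] := List.drop_eq_nil_of_le (by omega)
          rw [hdrop, show pars.length - i = 1 by omega, List.take_succ_cons, hnil]
          simp
          omega
        · rw [markersB_step pars mf i hmf hi, if_neg hc,
            markersB_nil pars mf (i + 1) h1, if_neg (lt_irrefl _)]

-- outer-loop characterisation
theorem outerA_eq_segsRef (pars : List String) :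
    ∀ (fuel i : Nat) (chaps : List (List String)), pars.length - i ≤ fuel →
    splitOuterA pars fuel i chaps =
      chaps ++ segsRef pars (markersB pars pars.length i) i := by
  intro fuel
  induction fuel with
  | zero =>
    intro i chaps hk
    have hi : ¬ i < pars.length := by omega
    rw [markersB_nil pars _ i hi]
    simp [splitOuterA, segsRef, hi]
  | succ fuel ih =>
    intro i chaps hk
    by_cases hi : i < pars.length
    · obtain ⟨e, he1, he2, he3, he4⟩ :=
        innerA_char pars pars.length i [] pars.length (by omega) hi (by omega)
      rw [splitOuterA, if_pos hi]
      simp only [he3]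
      by_cases hen : e < pars.length
      · rw [ih (e + 2) (chaps ++ [[] ++ (pars.drop i).take (e - i)]) (by omega), he4]
        simp [hen, segsRef]
      · have he : e = pars.length := by omega
        have hstop : splitOuterA pars fuel (e + 2) (chaps ++ [[] ++ (pars.drop i).take (e - i)]) =
            chaps ++ [[] ++ (pars.drop i).take (e - i)] := by
          cases fuel with
          | zero => rfl
          | succ fuel => rw [splitOuterA, if_neg (by omega)]
        rw [hstop, he4, if_neg hen]
        have ht : (pars.drop i).take (e - i) = pars.drop i :=
          List.take_of_length_le (by simp [he])
        simp [segsRef, hi, ht]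
    · rw [markersB_nil pars _ i hi]
      cases fuel with
      | zero => simp [splitOuterA, segsRef, hi]
      | succ fuel =>
        rw [splitOuterA, if_neg hi]
        simp [segsRef, hi]

-- ===== VERDICT (by name: the statement is the Claim_ definition above) =====
theorem split_into_chaps_spec : Claim_equal_split_into_chaps := by
  intro pars _
  unfold Spec_split_into_chaps split_into_chaps split_into_chaps_alt
  rw [outerA_eq_segsRef pars (pars.length + 1) 0 [] (by omega)]
  simp only []
  rw [foldB_eq_segsRef pars (markersB pars pars.length 0) [] 0]
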